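-- pv_equiv track=rewrite | github.com/syaheer-altaf/rag_4_cpr | solutions/id51.py | generate_patterns
-- ===== SOURCE A (Python) =====
-- def generate_patterns(number):
--     str_num = str(number)
--     patterns = []
--     length = len(str_num)
--     for mask in range(1, 1 << length):
--         pattern = []
--         for i in range(length):
--             if mask & (1 << i):
--                 pattern.append('*')
--             else:
--                 pattern.append(str_num[i])
--         patterns.append(''.join(pattern))
--     return patterns
-- ===== SOURCE B (Python) =====
-- def generate_patterns(number):
--     str_num = str(number)
--
--     def rec(i):
--         if i == len(str_num):
--             return ['']
--         out = []
--         for suffix in rec(i + 1):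
--             out.append(str_num[i] + suffix)
--             out.append('*' + suffix)
--         return out
--
--     return rec(0)[1:]
-- ===== Notes on version B (the rewrite author's own statement) =====
-- stated objective: alternative
-- what changed: Replaced the bitmask enumeration (outer loop over masks 1..2^len with an inner per-bit loop) by a recursion over digit positions that doubles the pattern list per position (digit-first, star-second) and drops the all-digits head.
import Mathlib
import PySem

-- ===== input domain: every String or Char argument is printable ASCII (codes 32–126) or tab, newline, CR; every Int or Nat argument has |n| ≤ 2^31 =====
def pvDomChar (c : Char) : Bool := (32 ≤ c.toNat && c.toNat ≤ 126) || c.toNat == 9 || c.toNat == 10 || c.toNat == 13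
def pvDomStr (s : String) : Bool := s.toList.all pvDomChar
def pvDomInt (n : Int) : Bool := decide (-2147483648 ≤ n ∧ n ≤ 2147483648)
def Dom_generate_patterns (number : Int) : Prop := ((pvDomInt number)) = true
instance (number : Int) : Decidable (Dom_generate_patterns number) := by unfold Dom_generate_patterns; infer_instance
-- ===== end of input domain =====

-- B replaces A's bitmask enumeration with a recursion over digit positions (same order, drop the all-digits head); objective: alternative decomposition.

-- ===== PORT A =====
-- 'mask & (1 << i)' is ported through Nat bitwise operations (mask ≥ 1 and 0 ≤ i, so .toNat is exact);
-- str_num[i] is ported as pyGetD over the code points (i < length always, so the default is never read);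
-- str(number) + ''.join are the code-point list PySem.Int.toChars and String.mk.
def generate_patterns (number : Int) : List String :=
  let str_num : List Char := PySem.Int.toChars number
  let length : Int := str_num.length
  (PySem.List.pyRange 1 (2 ^ length.toNat) 1).foldl (fun patterns mask =>
    let pattern : List Char :=
      (PySem.List.pyRange 0 length 1).foldl (fun pattern i =>
        if mask.toNat &&& (1 <<< i.toNat) ≠ 0 then pattern ++ ['*']
        else pattern ++ [PySem.List.pyGetD str_num i ' ']) []
    patterns ++ [String.mk pattern]) []

-- ===== PORT B =====
-- rec(i) of Source B walks positions i.. of str_num: that is structural recursion on the code-point suffix.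
def genRec (s : List Char) : List (List Char) :=
  match s with
  | [] => [[]]
  | c :: rest =>
    (genRec rest).foldl (fun out suffix => (out ++ [c :: suffix]) ++ ['*' :: suffix]) []

def generate_patterns_alt (number : Int) : List String :=
  ((genRec (PySem.Int.toChars number)).map String.mk).drop 1

-- ===== PRECONDITION & SPEC =====
def Spec_generate_patterns (number : Int) (out : List String) : Prop := out = generate_patterns_alt number
instance (number : Int) (out : List String) : Decidable (Spec_generate_patterns number out) := by unfold Spec_generate_patterns; infer_instance

-- ===== CLAIM (what is proved, stated in full; the proofs are below) =====
def Claim_equal_generate_patterns : Prop := ∀ (number : Int), Dom_generate_patterns number → Spec_generate_patterns number (generate_patterns number)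

-- ===== LEMMAS AND PROOFS =====

-- the pattern for one mask, read off bit by bit
def patt : Nat → List Char → List Char
  | _, [] => []
  | m, c :: cs => (if m % 2 = 1 then '*' else c) :: patt (m / 2) cs

-- B's enumeration, flatMap form
def pattList : List Char → List (List Char)
  | [] => [[]]
  | c :: cs => (pattList cs).flatMap (fun suf => [c :: suf, '*' :: suf])

theorem range_two_mul_flatMap (N : Nat) :
    List.range (2 * N) = (List.range N).flatMap (fun q => [2 * q, 2 * q + 1]) := by
  induction N with
  | zero => rfl
  | succ n ih =>
    have h : 2 * (n + 1) = 2 * n + 1 + 1 := by omega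
    rw [h, List.range_succ, List.range_succ, List.range_succ, ih]
    simp [List.flatMap_append]

theorem bit_test_iff (k j : Nat) : (k &&& (1 <<< j) ≠ 0) ↔ k.testBit j := by
  rw [Nat.one_shiftLeft, Nat.and_two_pow]
  cases h : k.testBit j
  · simp [h]
  · simp

theorem map_range_patt (cs : List Char) (k : Nat) :
    (List.range cs.length).map
      (fun j => if k &&& (1 <<< j) ≠ 0 then '*' else cs.getD j ' ') = patt k cs := by
  induction cs generalizing k with
  | nil => rfl
  | cons c cs ih =>
    rw [List.length_cons, List.range_succ_eq_map]
    simp only [List.map_cons, List.map_map]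
    congr 1
    · simp only [List.getD_cons_zero, bit_test_iff, Nat.testBit_zero]
      by_cases h : k % 2 = 1 <;> simp [h]
    · rw [← ih (k / 2)]
      apply List.map_congr_left
      intro j _
      simp only [Function.comp, List.getD_cons_succ, bit_test_iff, Nat.succ_eq_add_one,
        Nat.testBit_add_one]

-- A's inner loop computes patt
theorem inner_eq_patt (cs : List Char) (k : Nat) :
    (PySem.List.pyRange 0 (cs.length : Int) 1).foldl (fun pattern i =>
        if k &&& (1 <<< i.toNat) ≠ 0 then pattern ++ ['*']
        else pattern ++ [PySem.List.pyGetD cs i ' ']) [] = patt k cs := by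
  have hf : (fun (pattern : List Char) (i : Int) =>
      if k &&& (1 <<< i.toNat) ≠ 0 then pattern ++ ['*']
      else pattern ++ [PySem.List.pyGetD cs i ' ']) =
      fun pattern i => pattern ++
        [if k &&& (1 <<< i.toNat) ≠ 0 then '*' else PySem.List.pyGetD cs i ' '] := by
    funext pat i; split <;> rfl
  rw [hf, PySem.List.foldl_append_singleton_eq_map, List.nil_append,
    PySem.List.pyRange_zero_natCast, List.map_map, ← map_range_patt cs k]
  apply List.map_congr_left
  intro j _
  simp [PySem.List.pyGetD_natCast]

theorem map_patt_eq_pattList (cs : List Char) :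
    (List.range (2 ^ cs.length)).map (fun m => patt m cs) = pattList cs := by
  induction cs with
  | nil => rfl
  | cons c cs ih =>
    rw [List.length_cons, pow_succ, mul_comm, range_two_mul_flatMap, List.map_flatMap,
      pattList, ← ih, List.flatMap_map]
    apply List.flatMap_congr
    intro q _
    have h1 : patt (2 * q) (c :: cs) = c :: patt q cs := by
      simp [patt, Nat.mul_mod_right]
    have h2 : patt (2 * q + 1) (c :: cs) = '*' :: patt q cs := by
      have : (2 * q + 1) / 2 = q := by omega
      have hm : (2 * q + 1) % 2 = 1 := by omega
      simp [patt, this, hm]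
    simp [h1, h2]

theorem genRec_eq_pattList (cs : List Char) : genRec cs = pattList cs := by
  induction cs with
  | nil => rfl
  | cons c cs ih =>
    rw [genRec, pattList, ← ih]
    have hf : (fun (out : List (List Char)) suffix =>
        (out ++ [c :: suffix]) ++ ['*' :: suffix]) =
        fun (out : List (List Char)) suffix => out ++ [c :: suffix, '*' :: suffix] := by
      funext out suf; simp
    rw [hf, PySem.List.foldl_append_eq_flatMap, List.nil_append]

-- ===== VERDICT (by name: the statement is the Claim_ definition above) =====
theorem generate_patterns_spec : Claim_equal_generate_patterns := by
  intro number _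
  unfold Spec_generate_patterns generate_patterns generate_patterns_alt
  simp only []
  set cs := PySem.Int.toChars number with hcs
  set n := cs.length with hn
  rw [PySem.List.foldl_append_singleton_eq_map, List.nil_append]
  have hlt : (0 : Int) < 2 ^ ((n : Int).toNat) := by positivity
  have htail : PySem.List.pyRange 1 (2 ^ ((n : Int).toNat)) 1 =
      (PySem.List.pyRange 0 (2 ^ ((n : Int).toNat)) 1).drop 1 := by
    rw [PySem.List.pyRange_one_cons hlt]; rfl
  have hpow : (2 : Int) ^ ((n : Int).toNat) = ((2 ^ n : Nat) : Int) := by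
    rw [Int.toNat_natCast]; push_cast; ring
  rw [htail, ← List.map_drop, hpow]
  rw [show PySem.List.pyRange 0 (((2 ^ n : Nat) : Int)) 1 =
        (List.range (2 ^ n)).map (fun (k : Nat) => (k : Int)) from
      PySem.List.pyRange_zero_natCast _]
  rw [← List.map_drop, List.map_map, genRec_eq_pattList, ← map_patt_eq_pattList,
    ← List.map_drop, List.map_map]
  apply List.map_congr_left
  intro k _
  simp only [Function.comp]
  congr 1
  simp only [Int.toNat_natCast]
  exact inner_eq_patt cs k
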